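-- pv_equiv track=rewrite | github.com/gtsgob/agothe-quantum-app | agothe_panel/emergence/dialogue_engine.py | analyze_dialogue
-- ===== SOURCE A (Python) =====
-- from typing import List, Dict, Any
--
-- def analyze_dialogue(responses: Dict[str, str]) -> Dict[str, Any]:
--     """
--     Analyze the collected responses to determine consensus and contradictions.
--     :param responses: A mapping from entity to response text.
--     :return: A dictionary summarizing consensus pairs and contradictions.
--     """
--     analysis: Dict[str, Any] = {"consensus": [], "contradictions": []}
--     # Simple heuristic: if responses are identical, mark consensus.
--     entity_list = list(responses.keys())
--     for i, ent_i in enumerate(entity_list):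
--         for j in range(i + 1, len(entity_list)):
--             ent_j = entity_list[j]
--             if responses[ent_i] == responses[ent_j]:
--                 analysis["consensus"].append((ent_i, ent_j))
--     return analysis
-- ===== SOURCE B (Python) =====
-- def analyze_dialogue(responses):
--     """Group entities by response text once, then emit each entity's later
--     same-text partners in first-entity-major order (same order as the
--     quadratic all-pairs scan)."""
--     groups = {}
--     for ent, text in responses.items():
--         groups.setdefault(text, []).append(ent)
--     consensus = []
--     for ent, text in responses.items():
--         rest = groups[text]
--         rest.pop(0)  # rest now holds the same-text entities after ent
--         consensus.extend((ent, other) for other in rest)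
--     return {"consensus": consensus, "contradictions": []}
-- ===== Notes on version B (the rewrite author's own statement) =====
-- stated objective: faster
-- what changed: Replaces A's all-pairs nested index scan with two passes: group entities by response text in a dict, then for each entity pop it off the front of its group and pair it with the remaining same-text entities, producing the pairs in the same first-entity-major order.
import Mathlib
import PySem

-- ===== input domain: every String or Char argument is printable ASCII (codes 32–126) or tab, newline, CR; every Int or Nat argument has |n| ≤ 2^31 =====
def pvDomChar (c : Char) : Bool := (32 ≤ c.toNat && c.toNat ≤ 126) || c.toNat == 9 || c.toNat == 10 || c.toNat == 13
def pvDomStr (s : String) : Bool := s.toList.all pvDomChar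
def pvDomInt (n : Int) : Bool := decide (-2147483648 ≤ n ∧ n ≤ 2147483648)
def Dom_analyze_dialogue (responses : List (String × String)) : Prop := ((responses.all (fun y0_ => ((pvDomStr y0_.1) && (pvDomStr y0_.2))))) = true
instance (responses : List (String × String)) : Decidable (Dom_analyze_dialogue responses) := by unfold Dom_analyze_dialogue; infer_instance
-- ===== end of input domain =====

-- B groups entities by response text once and emits each entity's later same-text
-- partners, replacing A's all-pairs index scan; same return value.

-- ===== PORT A =====
-- The dict parameter arrives as an association list; Dict.ofList rebuilds Python's
-- dict (insertion order, overwrite in place): both programs receive a dict.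
def analyze_dialogue (responses : List (String × String)) : List (String × List (String × String)) :=
  let d : PySem.Dict String String := PySem.Dict.ofList responses
  -- entity_list = list(responses.keys())
  let entity_list := PySem.Dict.keys d
  -- for i, ent_i in enumerate(entity_list): for j in range(i+1, len(entity_list)): …
  let consensus :=
    (PySem.List.enumerate entity_list).foldl
      (fun acc p =>
        (PySem.List.pyRange (p.1 + 1) (entity_list.length : Int) 1).foldl
          (fun acc2 j =>
            let ent_j := PySem.List.pyGetD entity_list j ""
            -- responses[ent_i] == responses[ent_j]; both keys are present, the lookup cannot fail
            if PySem.Dict.getD d p.2 "" == PySem.Dict.getD d ent_j "" then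
              acc2 ++ [(p.2, ent_j)]
            else acc2)
          acc)
      []
  [("consensus", consensus), ("contradictions", [])]

-- ===== PORT B =====
def analyze_dialogue_alt (responses : List (String × String)) : List (String × List (String × String)) :=
  let items := (PySem.Dict.ofList responses).items
  -- groups.setdefault(text, []).append(ent)
  let groups : PySem.Dict String (List String) :=
    items.foldl (fun g kv => g.modify kv.2 [] (fun l => l ++ [kv.1])) PySem.Dict.empty
  -- second pass: pop ent off the front of its group, pair it with the remainder
  let final :=
    items.foldl
      (fun (st : PySem.Dict String (List String) × List (String × String)) kv =>
        let rest := (st.1.getD kv.2 []).tail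
        (st.1.insert kv.2 rest, st.2 ++ rest.map (fun o => (kv.1, o))))
      (groups, [])
  [("consensus", final.2), ("contradictions", [])]

-- ===== PRECONDITION & SPEC =====
def Spec_analyze_dialogue (responses : List (String × String)) (out : List (String × List (String × String))) : Prop := out = analyze_dialogue_alt responses
instance (responses : List (String × String)) (out : List (String × List (String × String))) : Decidable (Spec_analyze_dialogue responses out) := by unfold Spec_analyze_dialogue; infer_instance

-- ===== CLAIM (what is proved, stated in full; the proofs are below) =====
def Claim_equal_analyze_dialogue : Prop := ∀ (responses : List (String × String)), Dom_analyze_dialogue responses → Spec_analyze_dialogue responses (analyze_dialogue responses)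

-- ===== LEMMAS AND PROOFS =====

-- keys of the items of L whose value is v, in order
def pvKeysWith (L : List (String × String)) (v : String) : List String :=
  (L.filter (fun p => p.2 == v)).map (·.1)

-- the common specification: each item paired with the later same-value keys
def pvPairs : List (String × String) → List (String × String)
  | [] => []
  | (k, v) :: rest => (pvKeysWith rest v).map (fun e => (k, e)) ++ pvPairs rest

theorem pvKeysWith_cons (k v w : String) (rest : List (String × String)) :
    pvKeysWith ((k, v) :: rest) w = if v = w then k :: pvKeysWith rest w else pvKeysWith rest w := by
  simp [pvKeysWith, List.filter_cons]
  split_ifs with h <;> simp_all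

-- B, first loop: groups maps each text to the keys carrying it, in order
theorem pv_groups_spec (items : List (String × String)) (v : String) :
    (items.foldl (fun g kv => g.modify kv.2 [] (fun l => l ++ [kv.1]))
      (PySem.Dict.empty : PySem.Dict String (List String))).getD v [] = pvKeysWith items v := by
  have h1 : items.foldl (fun g kv => g.modify kv.2 [] (fun l => l ++ [kv.1]))
      (PySem.Dict.empty : PySem.Dict String (List String))
      = (items.map (fun kv => (kv.2, kv.1))).foldl
        (fun g p => g.modify p.1 [] (fun l => l ++ [p.2])) PySem.Dict.empty := by
    rw [List.foldl_map]
  rw [h1, PySem.Dict.getD_foldl_modify_append]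
  simp [pvKeysWith, List.filter_map, Function.comp_def]

-- B, second loop: invariant 'groups[v] = keys of the unprocessed items with value v'
theorem pv_foldB (L : List (String × String)) (g : PySem.Dict String (List String))
    (acc : List (String × String)) (h : ∀ v, g.getD v [] = pvKeysWith L v) :
    (L.foldl
      (fun (st : PySem.Dict String (List String) × List (String × String)) kv =>
        let rest := (st.1.getD kv.2 []).tail
        (st.1.insert kv.2 rest, st.2 ++ rest.map (fun o => (kv.1, o)))) (g, acc)).2
      = acc ++ pvPairs L := by
  induction L generalizing g acc with
  | nil => simp [pvPairs]
  | cons kv rest ih =>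
    obtain ⟨k, v⟩ := kv
    have hv := h v
    rw [pvKeysWith_cons] at hv
    simp at hv
    simp only [List.foldl_cons]
    have htail : (g.getD v []).tail = pvKeysWith rest v := by simp [hv]
    rw [ih _ _ ?_]
    · simp [pvPairs, htail, List.append_assoc]
    · intro w
      rw [PySem.Dict.getD_insert]
      by_cases hw : w = v
      · subst hw; simp [htail]
      · rw [if_neg hw, h w, pvKeysWith_cons, if_neg (fun hvw => hw hvw.symm)]

-- A's double index loop, generalized over the processed prefix length n
theorem pv_foldA (d : PySem.Dict String String) (ks : List String)
    (hd : ∀ p ∈ d.items, d.getD p.1 "" = p.2) :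
    ∀ (L : List (String × String)) (n : Nat) (acc : List (String × String)),
      (∀ p ∈ L, p ∈ d.items) → ks.drop n = L.map (·.1) →
      ((PySem.List.enumerate (L.map (·.1)) n).foldl
        (fun acc p =>
          (PySem.List.pyRange (p.1 + 1) (ks.length : Int) 1).foldl
            (fun acc2 j =>
              if PySem.Dict.getD d p.2 "" == PySem.Dict.getD d (PySem.List.pyGetD ks j "") "" then
                acc2 ++ [(p.2, PySem.List.pyGetD ks j "")]
              else acc2)
            acc)
        acc) = acc ++ pvPairs L := by
  intro L
  induction L with
  | nil => intro n acc _ _; simp [pvPairs]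
  | cons kv rest ih =>
    intro n acc hmem hdrop
    obtain ⟨k, v⟩ := kv
    simp only [List.map_cons, PySem.List.enumerate_cons, List.foldl_cons]
    have hstep : ((↑n : Int) + 1).toNat = n + 1 := by omega
    have hdropn1 : ks.drop (n + 1) = rest.map (·.1) := by
      have := List.drop_drop (i := 1) (j := n) (l := ks)
      rw [← this, hdrop]; simp
    have hfk : d.getD k "" = v := hd (k, v) (hmem _ (by simp))
    have inner :
        (PySem.List.pyRange ((↑n : Int) + 1) (ks.length : Int) 1).foldl
          (fun acc2 j =>
            if PySem.Dict.getD d ((↑n, k) : Int × String).2 "" == PySem.Dict.getD d (PySem.List.pyGetD ks j "") "" then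
              acc2 ++ [(((↑n, k) : Int × String).2, PySem.List.pyGetD ks j "")]
            else acc2)
          acc
        = acc ++ (pvKeysWith rest v).map (fun e => (k, e)) := by
      rw [PySem.List.foldl_pyRange_pyGetD' ks ""
        (f := fun acc2 e => if PySem.Dict.getD d k "" == PySem.Dict.getD d e "" then acc2 ++ [(k, e)] else acc2)
        acc (by positivity)]
      rw [hstep, hdropn1]
      rw [PySem.List.foldl_append_if (p := fun e => PySem.Dict.getD d k "" == PySem.Dict.getD d e "")
        (f := fun e => (k, e))]
      congr 1
      rw [List.filter_map]
      unfold pvKeysWith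
      congr 2
      apply List.filter_congr
      intro p hp
      have hpv : d.getD p.1 "" = p.2 := hd p (hmem _ (by simp [hp]))
      simp only [Function.comp, hfk, hpv]
      by_cases h : v = p.2
      · simp [h]
      · simp [h, Ne.symm h]
    rw [inner]
    have h2 := ih (n + 1) (acc ++ (pvKeysWith rest v).map (fun e => (k, e)))
      (fun p hp => hmem _ (by simp [hp])) hdropn1
    push_cast at h2
    rw [h2]
    simp [pvPairs, List.append_assoc]

-- ===== VERDICT (by name: the statement is the Claim_ definition above) =====
theorem analyze_dialogue_spec : Claim_equal_analyze_dialogue := by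
  intro responses _
  show analyze_dialogue responses = analyze_dialogue_alt responses
  unfold analyze_dialogue analyze_dialogue_alt
  have hnd : (PySem.Dict.ofList responses).keys.Nodup := PySem.Dict.nodup_keys_ofList responses
  have hd : ∀ p ∈ (PySem.Dict.ofList responses).items,
      (PySem.Dict.ofList responses).getD p.1 "" = p.2 := by
    intro p hp
    obtain ⟨k, v⟩ := p
    exact PySem.Dict.getD_of_mem_items _ hp hnd ""
  have hks : (PySem.Dict.keys (PySem.Dict.ofList responses)).drop 0
      = (PySem.Dict.ofList responses).items.map (·.1) := by
    simp [PySem.Dict.keys]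
  have hA := pv_foldA (PySem.Dict.ofList responses) (PySem.Dict.keys (PySem.Dict.ofList responses))
    hd (PySem.Dict.ofList responses).items 0 [] (fun _ hp => hp) hks
  have hB := pv_foldB (PySem.Dict.ofList responses).items
    (((PySem.Dict.ofList responses).items).foldl
      (fun g kv => g.modify kv.2 [] (fun l => l ++ [kv.1])) PySem.Dict.empty) []
    (fun v => pv_groups_spec _ v)
  simp only [Nat.cast_zero] at hA
  have hitems : ((PySem.Dict.ofList responses).items.map (·.1))
      = PySem.Dict.keys (PySem.Dict.ofList responses) := by
    simp [PySem.Dict.keys]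
  rw [hitems] at hA
  simp only [hA, hB, List.nil_append]
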